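-- pv_equiv track=rewrite | github.com/dominicksanakiewicz/domabs | data/raw-data/Final_data/process_rc16_rc17.py | format_grades
-- ===== SOURCE A (Python) =====
-- def format_grades(grades_str):
--     """Format grades from '9 10 11 12' to '9 - 12'."""
--     parts = grades_str.strip().split()
--     nums = []
--     for p in parts:
--         try:
--             nums.append(int(p))
--         except ValueError:
--             pass
--     if not nums:
--         return grades_str.strip()
--     if len(nums) == 1:
--         return str(nums[0])
--     return f"{min(nums)} - {max(nums)}"
-- ===== SOURCE B (Python) =====
-- def format_grades(grades_str):
--     """Format grades from '9 10 11 12' to '9 - 12' (single pass, no list)."""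
--     lo = hi = None
--     count = 0
--     for tok in grades_str.strip().split():
--         try:
--             v = int(tok)
--         except ValueError:
--             continue
--         count += 1
--         if lo is None:
--             lo = hi = v
--         else:
--             if v < lo:
--                 lo = v
--             if hi < v:
--                 hi = v
--     if lo is None:
--         return grades_str.strip()
--     if count == 1:
--         return str(lo)
--     return f"{lo} - {hi}"
-- ===== Notes on version B (the rewrite author's own statement) =====
-- stated objective: alternative
-- what changed: Replaces build-a-list-of-parsed-ints followed by separate min() and max() scans with a single pass over the tokens maintaining running lo/hi and a count, never materialising the list.
import Mathlib
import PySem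

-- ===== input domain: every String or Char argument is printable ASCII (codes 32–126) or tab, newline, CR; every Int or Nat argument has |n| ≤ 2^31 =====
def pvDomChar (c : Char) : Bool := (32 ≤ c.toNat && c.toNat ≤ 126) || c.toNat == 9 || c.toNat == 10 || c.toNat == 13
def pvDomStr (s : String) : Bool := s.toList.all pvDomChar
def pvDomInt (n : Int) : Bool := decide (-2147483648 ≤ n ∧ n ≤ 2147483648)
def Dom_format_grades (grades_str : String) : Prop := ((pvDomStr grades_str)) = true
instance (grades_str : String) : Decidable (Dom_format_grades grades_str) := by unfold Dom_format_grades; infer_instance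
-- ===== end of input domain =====

-- B replaces A's build-list-then-min()-and-max() with one accumulating pass keeping running lo/hi/count (alternative decomposition, same cost).

-- ===== PORT A =====
-- parts = grades_str.strip().split(); nums = [] ; for p in parts: try nums.append(int(p)) except pass
def format_grades (grades_str : String) : String :=
  let parts := PySem.Str.split₀ (PySem.Str.strip grades_str)
  let nums := parts.foldl (fun acc p =>
    match PySem.Int.ofStr? p with
    | some n => acc ++ [n]
    | none => acc) []
  if nums.length = 0 then PySem.Str.strip grades_str
  else if nums.length = 1 then PySem.Int.toStr (PySem.List.pyGetD nums 0 0)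
  else
    match PySem.List.min? nums (fun x => x), PySem.List.max? nums (fun x => x) with
    | some mn, some mx => PySem.Int.toStr mn ++ " - " ++ PySem.Int.toStr mx
    | _, _ => PySem.Str.strip grades_str  -- unreachable: nums is nonempty here

-- ===== PORT B =====
-- one token step of B's loop: parse; on success bump count and update running (lo, hi)
def fgStep (st : Option (Int × Int) × Nat) (p : String) : Option (Int × Int) × Nat :=
  match PySem.Int.ofStr? p with
  | none => st
  | some v =>
    let c := st.2 + 1
    match st.1 with
    | none => (some (v, v), c)
    | some (lo, hi) => (some ((if v < lo then v else lo), (if hi < v then v else hi)), c)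

def format_grades_alt (grades_str : String) : String :=
  let st := (PySem.Str.split₀ (PySem.Str.strip grades_str)).foldl fgStep (none, 0)
  match st.1 with
  | none => PySem.Str.strip grades_str
  | some (lo, hi) =>
    if st.2 = 1 then PySem.Int.toStr lo
    else PySem.Int.toStr lo ++ " - " ++ PySem.Int.toStr hi

-- ===== PRECONDITION & SPEC =====
def Spec_format_grades (grades_str : String) (out : String) : Prop := out = format_grades_alt grades_str
instance (grades_str : String) (out : String) : Decidable (Spec_format_grades grades_str out) := by unfold Spec_format_grades; infer_instance

-- ===== CLAIM (what is proved, stated in full; the proofs are below) =====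
def Claim_equal_format_grades : Prop := ∀ (grades_str : String), Dom_format_grades grades_str → Spec_format_grades grades_str (format_grades grades_str)

-- ===== LEMMAS AND PROOFS =====

-- the (lo, hi, count) state B's loop maintains, as a function of the ints seen so far
def fgEnc : List Int → Option (Int × Int) × Nat
  | [] => (none, 0)
  | x :: xs => (some (xs.foldl min x, xs.foldl max x), xs.length + 1)

theorem fgStep_enc (l : List Int) (p : String) :
    fgStep (fgEnc l) p = fgEnc (l ++ (PySem.Int.ofStr? p).toList) := by
  cases h : PySem.Int.ofStr? p with
  | none => cases l <;> simp [fgStep, fgEnc, h]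
  | some v =>
    cases l with
    | nil => simp [fgStep, fgEnc, h]
    | cons x xs =>
      simp [fgStep, fgEnc, h, List.foldl_append]
      omega

theorem fg_fold_B (parts : List String) (l : List Int) :
    parts.foldl fgStep (fgEnc l) = fgEnc (l ++ parts.filterMap PySem.Int.ofStr?) := by
  induction parts generalizing l with
  | nil => simp
  | cons p ps ih =>
    rw [List.foldl_cons, fgStep_enc, ih]
    cases h : PySem.Int.ofStr? p <;> simp [h]

theorem fg_fold_A (parts : List String) (acc : List Int) :
    parts.foldl (fun acc p =>
      match PySem.Int.ofStr? p with
      | some n => acc ++ [n]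
      | none => acc) acc = acc ++ parts.filterMap PySem.Int.ofStr? := by
  induction parts generalizing acc with
  | nil => simp
  | cons p ps ih =>
    rw [List.foldl_cons]
    cases h : PySem.Int.ofStr? p <;> simp [h, ih]

-- ===== VERDICT (by name: the statement is the Claim_ definition above) =====
theorem format_grades_spec : Claim_equal_format_grades := by
  intro s _
  show format_grades s = format_grades_alt s
  have hB : (PySem.Str.split₀ (PySem.Str.strip s)).foldl fgStep (none, 0)
      = fgEnc ((PySem.Str.split₀ (PySem.Str.strip s)).filterMap PySem.Int.ofStr?) := by
    simpa [fgEnc] using fg_fold_B (PySem.Str.split₀ (PySem.Str.strip s)) []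
  simp only [format_grades, format_grades_alt, fg_fold_A, List.nil_append, hB]
  cases hn : (PySem.Str.split₀ (PySem.Str.strip s)).filterMap PySem.Int.ofStr? with
  | nil => simp [fgEnc]
  | cons x xs =>
    cases xs with
    | nil => simp [fgEnc, PySem.List.pyGetD_zero_cons]
    | cons y ys =>
      simp [fgEnc, PySem.List.min?_id_cons, PySem.List.max?_id_cons]
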